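-- pv_equiv track=rewrite | github.com/Bhanjo/algorithm | solved/solved4/back11444.py | calcOdd
-- ===== SOURCE A (Python) =====
-- def calcOdd(graph):
--     tempGraph = [[0,0],[0,0]]
--     originGraph = [[1,1],[1,0]]
--     for i in range(2):
--         for j in range(2):
--             for k in range(2):
--                 tempGraph[i][j] += graph[i][k] * graph[k][j]
--             tempGraph[i][j] %= 1000000007
--
--     ansGraph = [[0,0],[0,0]]
--     for i in range(2):
--         for j in range(2):
--             for k in range(2):
--                 ansGraph[i][j] += tempGraph[i][k] * originGraph[k][j]
--             ansGraph[i][j] %= 1000000007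
--
--     return ansGraph
-- ===== SOURCE B (Python) =====
-- def calcOdd(graph):
--     M = 1000000007
--     # Reassociate: graph^2 @ Q == graph @ (graph @ Q) with Q = [[1,1],[1,0]].
--     # graph @ Q needs no multiplications: it is [row[0]+row[1], row[0]] per row.
--     h = [[row[0] + row[1], row[0]] for row in graph[:2]]
--     # single 2x2 multiplication graph @ h, reduced mod M per entry
--     return [[sum(graph[i][k] * h[k][j] for k in range(2)) % M
--              for j in range(2)] for i in range(2)]
-- ===== Notes on version B (the rewrite author's own statement) =====
-- stated objective: alternative
-- what changed: Reassociates the product: instead of squaring the matrix and then multiplying by Q=[[1,1],[1,0]] (two multiplications with intermediate mod reductions), B first forms graph@Q by pure column additions (no multiplications) and then performs a single generic 2x2 multiplication graph@(graph@Q), reducing mod 1000000007 only once per output entry.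
import Mathlib
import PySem

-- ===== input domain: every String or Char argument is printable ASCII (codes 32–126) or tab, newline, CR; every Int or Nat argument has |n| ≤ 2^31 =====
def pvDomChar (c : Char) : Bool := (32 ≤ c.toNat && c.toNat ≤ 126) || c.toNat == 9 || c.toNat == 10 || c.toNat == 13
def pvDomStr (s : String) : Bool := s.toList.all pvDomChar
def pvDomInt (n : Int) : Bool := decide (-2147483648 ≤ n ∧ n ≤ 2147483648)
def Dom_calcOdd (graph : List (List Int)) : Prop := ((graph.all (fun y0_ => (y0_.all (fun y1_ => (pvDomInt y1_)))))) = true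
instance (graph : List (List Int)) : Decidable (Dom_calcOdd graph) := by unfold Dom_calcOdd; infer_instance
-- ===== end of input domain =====

-- B reassociates (graph·graph)·Q into graph·(graph·Q): graph·Q is mere column additions, leaving a single 2x2 multiplication (objective: alternative).

-- ===== PORT A =====
-- graph[i][k]: Python indexing; Pre_ guarantees both indices are in range, so getD is never reached
def pvGet (graph : List (List Int)) (i k : Int) : Int :=
  (PySem.List.pyGet? ((PySem.List.pyGet? graph i).getD []) k).getD 0

-- tempGraph[i][j] = v (indices are the loop variables 0/1, always nonnegative)
def pvSet (t : List (List Int)) (i j : Int) (v : Int) : List (List Int) :=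
  t.set i.toNat ((t.getD i.toNat []).set j.toNat v)

def calcOdd (graph : List (List Int)) : List (List Int) :=
  let M : Int := 1000000007
  let originGraph : List (List Int) := [[1,1],[1,0]]
  let tempGraph : List (List Int) := [[0,0],[0,0]]
  let tempGraph := (PySem.List.pyRange 0 2 1).foldl (fun t i =>
    (PySem.List.pyRange 0 2 1).foldl (fun t j =>
      let v := (PySem.List.pyRange 0 2 1).foldl
        (fun acc k => acc + pvGet graph i k * pvGet graph k j) (pvGet t i j)
      pvSet t i j (v % M)) t) tempGraph
  let ansGraph : List (List Int) := [[0,0],[0,0]]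
  (PySem.List.pyRange 0 2 1).foldl (fun t i =>
    (PySem.List.pyRange 0 2 1).foldl (fun t j =>
      let v := (PySem.List.pyRange 0 2 1).foldl
        (fun acc k => acc + pvGet tempGraph i k * pvGet originGraph k j) (pvGet t i j)
      pvSet t i j (v % M)) t) ansGraph

-- ===== PORT B =====
-- row[0], row[1] inside the comprehension; in range under Pre_
def pvRowGet (row : List Int) (j : Int) : Int :=
  (PySem.List.pyGet? row j).getD 0

def calcOdd_alt (graph : List (List Int)) : List (List Int) :=
  let M : Int := 1000000007
  let h := (PySem.List.slice graph none (some 2)).map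
    (fun row => [pvRowGet row 0 + pvRowGet row 1, pvRowGet row 0])
  (PySem.List.pyRange 0 2 1).map (fun i =>
    (PySem.List.pyRange 0 2 1).map (fun j =>
      ((PySem.List.pyRange 0 2 1).foldl
        (fun acc k => acc + pvGet graph i k * pvGet h k j) 0) % M))

-- ===== PRECONDITION & SPEC =====
-- Pre_: Python A raises IndexError unless the graph has at least two rows whose first two entries exist.
def Pre_calcOdd (graph : List (List Int)) : Prop :=
  2 ≤ graph.length ∧ ∀ row ∈ graph.take 2, 2 ≤ row.length
instance (graph : List (List Int)) : Decidable (Pre_calcOdd graph) := by unfold Pre_calcOdd; infer_instance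
def pvWitness_calcOdd : List (List Int) := [[1, 2], [3, 4]]

def Spec_calcOdd (graph : List (List Int)) (out : List (List Int)) : Prop := out = calcOdd_alt graph
instance (graph : List (List Int)) (out : List (List Int)) : Decidable (Spec_calcOdd graph out) := by unfold Spec_calcOdd; infer_instance

-- ===== CLAIM (what is proved, stated in full; the proofs are below) =====
def Claim_equal_calcOdd : Prop := ∀ (graph : List (List Int)), Dom_calcOdd graph → Pre_calcOdd graph → Spec_calcOdd graph (calcOdd graph)

-- ===== LEMMAS AND PROOFS =====
theorem pvRange01 : PySem.List.pyRange 0 2 1 = [0, 1] := by decide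

theorem pvGet_zero (r : List Int) (rows : List (List Int)) (j : Int) :
    pvGet (r :: rows) 0 j = (PySem.List.pyGet? r j).getD 0 := by
  simp [pvGet]

theorem pvGet_one' (r0 r1 : List Int) (rows : List (List Int)) (j : Int) :
    pvGet (r0 :: r1 :: rows) 1 j = (PySem.List.pyGet? r1 j).getD 0 := by
  simp [pvGet]

-- ===== VERDICT (by name: the statement is the Claim_ definition above) =====
theorem calcOdd_spec : Claim_equal_calcOdd := by
  intro graph _ hpre
  obtain ⟨hlen, hrows⟩ := hpre
  match graph, hlen with
  | r0 :: r1 :: rest, _ =>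
    have h0 : 2 ≤ r0.length := hrows r0 (by simp)
    have h1 : 2 ≤ r1.length := hrows r1 (by simp)
    match r0, h0, r1, h1 with
    | a :: b :: r0', _, c :: d :: r1', _ =>
      show calcOdd _ = calcOdd_alt _
      simp [calcOdd, calcOdd_alt, pvRange01, pvSet, pvRowGet, List.foldl,
            pvGet_zero, pvGet_one', PySem.List.pyGet?_zero_cons,
            PySem.List.slice]
      constructor <;> ring_nf
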